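-- pv_equiv track=rewrite | github.com/davidgan1218/CitadelTerminalAlgo | algo3-4.py | column_sequence
-- ===== SOURCE A (Python) =====
-- def column_sequence(start):
--     res = [start]
--     if start<=9:
--         left = 3
--         right = 6
--     elif start <= 16:
--         left = 11
--         right = 16
--     else:
--         left = 21
--         right = 24
--
--     for i in range(1, 7):
--         inc = i if start <=9 else i #prioritizing build towards center
--         if (start + inc <=right and start + inc >= left):
--             res.append(start + inc)
--         if (start - inc >= left and start - inc <=right):
--             res.append(start - inc)
--     return res
-- ===== SOURCE B (Python) =====
-- def column_sequence(start):
--     if start <= 9: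
--         left, right = 3, 6
--     elif start <= 16:
--         left, right = 11, 16
--     else:
--         left, right = 21, 24
--     cands = [c for c in range(left, right + 1) if c != start and abs(c - start) <= 6]
--     cands.sort(key=lambda c: (abs(c - start), c < start))
--     return [start] + cands
-- ===== Notes on version B (the rewrite author's own statement) =====
-- stated objective: simpler
-- what changed: Replaces the outward distance-by-distance expansion loop (two in-band membership checks per distance) with a single comprehension collecting the in-band columns within the fixed distance cutoff plus one stable sort keyed by (distance, below-start), which reproduces the near-first, above-before-below order.
import Mathlib
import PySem

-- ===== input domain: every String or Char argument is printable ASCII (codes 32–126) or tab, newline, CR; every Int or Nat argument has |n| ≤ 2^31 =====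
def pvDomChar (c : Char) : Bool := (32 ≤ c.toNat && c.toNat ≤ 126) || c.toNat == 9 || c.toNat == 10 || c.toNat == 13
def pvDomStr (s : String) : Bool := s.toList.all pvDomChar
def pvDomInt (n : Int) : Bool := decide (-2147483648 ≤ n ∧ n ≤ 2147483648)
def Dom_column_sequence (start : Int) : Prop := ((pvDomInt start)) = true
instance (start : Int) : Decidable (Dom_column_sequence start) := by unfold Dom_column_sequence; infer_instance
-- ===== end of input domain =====

-- ===== PORT A =====
-- B replaces A's outward distance-by-distance loop with collect-band-then-sort (objective: simpler).
-- loop body of A's for-loop, kept as a helper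
def csBody (start left right : Int) (res : List Int) (i : Int) : List Int :=
  let inc : Int := if start ≤ 9 then i else i
  let res := if start + inc ≤ right ∧ start + inc ≥ left then res ++ [start + inc] else res
  if start - inc ≥ left ∧ start - inc ≤ right then res ++ [start - inc] else res

def column_sequence (start : Int) : List Int :=
  let res : List Int := [start]
  let lr : Int × Int :=
    if start ≤ 9 then (3, 6)
    else if start ≤ 16 then (11, 16)
    else (21, 24)
  (PySem.List.pyRange 1 7 1).foldl (csBody start lr.1 lr.2) res

-- ===== PORT B =====
def column_sequence_alt (start : Int) : List Int :=
  let lr : Int × Int :=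
    if start ≤ 9 then (3, 6)
    else if start ≤ 16 then (11, 16)
    else (21, 24)
  let cands := (PySem.List.pyRange lr.1 (lr.2 + 1) 1).filter
      (fun c => decide (c ≠ start ∧ (c - start).natAbs ≤ 6))
  start :: PySem.List.sorted2 cands (fun c => ((c - start).natAbs : Int)) (fun c => decide (c < start)) false

-- ===== PRECONDITION & SPEC =====
def Spec_column_sequence (start : Int) (out : List Int) : Prop := out = column_sequence_alt start
instance (start : Int) (out : List Int) : Decidable (Spec_column_sequence start out) := by unfold Spec_column_sequence; infer_instance

-- ===== CLAIM (what is proved, stated in full; the proofs are below) =====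
def Claim_equal_column_sequence : Prop := ∀ (start : Int), Dom_column_sequence start → Spec_column_sequence start (column_sequence start)

-- ===== LEMMAS AND PROOFS =====
lemma csBody_id (start le r : Int) (res : List Int) (i : Int)
    (h1 : ¬(start + i ≤ r ∧ start + i ≥ le)) (h2 : ¬(start - i ≥ le ∧ start - i ≤ r)) :
    csBody start le r res i = res := by
  simp only [csBody, ite_self]
  rw [if_neg h1, if_neg h2]

lemma foldl_csBody_id (start le r : Int) (l : List Int) (res : List Int)
    (h : ∀ i ∈ l, ¬(start + i ≤ r ∧ start + i ≥ le) ∧ ¬(start - i ≥ le ∧ start - i ≤ r)) :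
    l.foldl (csBody start le r) res = res := by
  induction l generalizing res with
  | nil => rfl
  | cons a t ih =>
    rw [List.foldl_cons, csBody_id _ _ _ _ _ (h a (by simp)).1 (h a (by simp)).2]
    exact ih res (fun i hi => h i (by simp [hi]))

-- far from any band column (start ≤ -4), both return just [start]
lemma cs_low (start : Int) (h : start ≤ -4) :
    column_sequence start = [start] ∧ column_sequence_alt start = [start] := by
  have h9 : start ≤ (9:Int) := by omega
  constructor
  · simp only [column_sequence, h9, if_true]
    exact foldl_csBody_id _ _ _ _ _ (fun i hi => by
      rw [PySem.List.mem_pyRange_one] at hi; omega)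
  · simp only [column_sequence_alt, h9, if_true]
    rw [List.filter_eq_nil_iff.mpr (fun c hc => by
      rw [PySem.List.mem_pyRange_one] at hc
      simp only [decide_eq_true_eq]
      omega)]
    rfl

-- far above the top band (start ≥ 31), both return just [start]
lemma cs_high (start : Int) (h : 31 ≤ start) :
    column_sequence start = [start] ∧ column_sequence_alt start = [start] := by
  have h9 : ¬ start ≤ (9:Int) := by omega
  have h16 : ¬ start ≤ (16:Int) := by omega
  constructor
  · simp only [column_sequence, h9, h16, if_false]
    exact foldl_csBody_id _ _ _ _ _ (fun i hi => by
      rw [PySem.List.mem_pyRange_one] at hi; omega)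
  · simp only [column_sequence_alt, h9, h16, if_false]
    rw [List.filter_eq_nil_iff.mpr (fun c hc => by
      rw [PySem.List.mem_pyRange_one] at hc
      simp only [decide_eq_true_eq]
      omega)]
    rfl

-- ===== VERDICT (by name: the statement is the Claim_ definition above) =====
theorem column_sequence_spec : Claim_equal_column_sequence := by
  intro start _
  unfold Spec_column_sequence
  by_cases hlo : start ≤ -4
  · rw [(cs_low start hlo).1, (cs_low start hlo).2]
  · by_cases hhi : 31 ≤ start
    · rw [(cs_high start hhi).1, (cs_high start hhi).2]
    · have h1 : -3 ≤ start := by omega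
      have h2 : start ≤ 30 := by omega
      interval_cases start <;> decide
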